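-- pv_equiv track=rewrite | github.com/oliver-leung/advent-of-code | 2021/day02.py | part2
-- ===== SOURCE A (Python) =====
-- def part2(data: list) -> tuple:
--     horiz = 0
--     depth = 0
--     aim = 0
--
--     for com, x in data:
--         if com == 'forward':
--             horiz += x
--             depth += aim * x
--         elif com == 'down':
--             aim += x
--         elif com == 'up':
--             aim -= x
--
--     return horiz, depth
-- ===== SOURCE B (Python) =====
-- def part2(data: list) -> tuple:
--     # Staged: prefix-sum the down/up deltas into an aim list, then take filtered sums.
--     deltas = [x if c == 'down' else -x if c == 'up' else 0 for c, x in data]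
--     aims = []
--     a = 0
--     for d in deltas:
--         a += d
--         aims.append(a)
--     horiz = sum(x for c, x in data if c == 'forward')
--     depth = sum(x * aim for (c, x), aim in zip(data, aims) if c == 'forward')
--     return horiz, depth
-- ===== Notes on version B (the rewrite author's own statement) =====
-- stated objective: alternative
-- what changed: Replaces the single stateful three-variable loop by staged passes: a delta map, a prefix-sum aim list, and two filtered sums (horiz over forwards, depth over forwards zipped with the aim list).
import Mathlib
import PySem

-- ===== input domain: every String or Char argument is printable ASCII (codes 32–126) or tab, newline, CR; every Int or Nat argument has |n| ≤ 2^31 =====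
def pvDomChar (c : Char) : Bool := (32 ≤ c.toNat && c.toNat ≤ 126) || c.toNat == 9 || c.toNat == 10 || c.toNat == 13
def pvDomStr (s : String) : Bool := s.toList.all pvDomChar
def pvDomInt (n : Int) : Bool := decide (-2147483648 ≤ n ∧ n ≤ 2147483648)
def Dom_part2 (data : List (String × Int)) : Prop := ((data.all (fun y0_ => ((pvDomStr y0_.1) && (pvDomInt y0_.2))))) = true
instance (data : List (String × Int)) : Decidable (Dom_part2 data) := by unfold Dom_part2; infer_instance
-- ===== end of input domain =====

-- B replaces A's single three-variable stateful loop by staged passes (delta map, prefix-sum aim list, two filtered sums); alternative decomposition, same cost.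

-- ===== PORT A =====
def part2 (data : List (String × Int)) : Int × Int :=
  let s := data.foldl
    (fun (st : Int × Int × Int) (cx : String × Int) =>
      let (horiz, depth, aim) := st
      let (com, x) := cx
      if com = "forward" then (horiz + x, depth + aim * x, aim)
      else if com = "down" then (horiz, depth, aim + x)
      else if com = "up" then (horiz, depth, aim - x)
      else (horiz, depth, aim))
    (0, 0, 0)
  (s.1, s.2.1)

-- ===== PORT B =====
def part2_alt (data : List (String × Int)) : Int × Int :=
  let deltas := data.map (fun cx =>
    if cx.1 = "down" then cx.2 else if cx.1 = "up" then -cx.2 else 0)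
  let aims := (deltas.foldl
    (fun (st : Int × List Int) d => (st.1 + d, st.2 ++ [st.1 + d])) (0, [])).2
  let horiz := ((data.filter (fun cx => cx.1 = "forward")).map (fun cx => cx.2)).sum
  let depth := (((data.zip aims).filter (fun p => p.1.1 = "forward")).map
    (fun p => p.1.2 * p.2)).sum
  (horiz, depth)

-- ===== PRECONDITION & SPEC =====
def Spec_part2 (data : List (String × Int)) (out : Int × Int) : Prop := out = part2_alt data
instance (data : List (String × Int)) (out : Int × Int) : Decidable (Spec_part2 data out) := by unfold Spec_part2; infer_instance

-- ===== CLAIM (what is proved, stated in full; the proofs are below) =====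
def Claim_equal_part2 : Prop := ∀ (data : List (String × Int)), Dom_part2 data → Spec_part2 data (part2 data)

-- ===== LEMMAS AND PROOFS =====

def stepA (st : Int × Int × Int) (cx : String × Int) : Int × Int × Int :=
  let (horiz, depth, aim) := st
  let (com, x) := cx
  if com = "forward" then (horiz + x, depth + aim * x, aim)
  else if com = "down" then (horiz, depth, aim + x)
  else if com = "up" then (horiz, depth, aim - x)
  else (horiz, depth, aim)

def deltaOf (cx : String × Int) : Int :=
  if cx.1 = "down" then cx.2 else if cx.1 = "up" then -cx.2 else 0

-- the aim prefix-sum list starting from a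
def scanFrom (a : Int) : List Int → List Int
  | [] => []
  | d :: t => (a + d) :: scanFrom (a + d) t

lemma aims_fold (l : List Int) (a : Int) (acc : List Int) :
    (l.foldl (fun (st : Int × List Int) d => (st.1 + d, st.2 ++ [st.1 + d])) (a, acc)).2
      = acc ++ scanFrom a l := by
  induction l generalizing a acc with
  | nil => simp [scanFrom]
  | cons d t ih => simp [scanFrom, ih]

def Hf (l : List (String × Int)) : Int :=
  ((l.filter (fun cx => cx.1 = "forward")).map (fun cx => cx.2)).sum

def Df (a : Int) (l : List (String × Int)) : Int :=
  (((l.zip (scanFrom a (l.map deltaOf))).filter (fun p => p.1.1 = "forward")).map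
    (fun p => p.1.2 * p.2)).sum

lemma Hf_cons (cx : String × Int) (t : List (String × Int)) :
    Hf (cx :: t) = (if cx.1 = "forward" then cx.2 else 0) + Hf t := by
  simp only [Hf, List.filter_cons]
  split <;> simp_all

lemma Df_cons (cx : String × Int) (t : List (String × Int)) :
    Df a (cx :: t)
      = (if cx.1 = "forward" then cx.2 * (a + deltaOf cx) else 0) + Df (a + deltaOf cx) t := by
  simp only [Df, List.map_cons, scanFrom, List.zip_cons_cons, List.filter_cons]
  split <;> simp_all

lemma key (l : List (String × Int)) (h d a : Int) :
    l.foldl stepA (h, d, a)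
      = (h + Hf l, d + Df a l, a + (l.map deltaOf).sum) := by
  induction l generalizing h d a with
  | nil => simp [Hf, Df, scanFrom]
  | cons cx t ih =>
    obtain ⟨com, x⟩ := cx
    rw [List.foldl_cons]
    simp only [stepA]
    rw [Hf_cons, Df_cons, List.map_cons, List.sum_cons]
    simp only [deltaOf]
    split_ifs <;> rw [ih] <;> simp only [Prod.mk.injEq] <;>
      refine ⟨?_, ?_, ?_⟩ <;>
      first
        | ring1
        | (simp only [add_zero, sub_eq_add_neg]; ring1)
        | (exfalso; clear ih; subst_vars; simp_all)

theorem part2_eq_alt (data : List (String × Int)) : part2 data = part2_alt data := by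
  show (let s := data.foldl stepA (0, 0, 0); (s.1, s.2.1)) = part2_alt data
  rw [key]
  simp only [part2_alt]
  rw [aims_fold]
  have hδ : (fun cx : String × Int =>
      if cx.1 = "down" then cx.2 else if cx.1 = "up" then -cx.2 else 0) = deltaOf := rfl
  rw [hδ]
  simp [Hf, Df]

-- ===== VERDICT (by name: the statement is the Claim_ definition above) =====
theorem part2_spec : Claim_equal_part2 := by
  intro data _
  unfold Spec_part2
  exact part2_eq_alt data
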